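-- pv_equiv track=rewrite | github.com/PaulCatalin19/Python | lab5/lab5.py | ex6
-- ===== SOURCE A (Python) =====
-- def ex6(nums):
--     even = []
--     odd = []
--     for num in nums:
--         if num % 2 == 0:
--             even.append(num)
--         else:
--             odd.append(num)
--     return list(zip(even, odd))
-- ===== SOURCE B (Python) =====
-- def ex6(nums):
--     evens = []
--     odds = []
--     result = []
--     for num in nums:
--         if num % 2 == 0:
--             evens.append(num)
--         else:
--             odds.append(num)
--         if evens and odds:
--             result.append((evens.pop(0), odds.pop(0)))
--     return result
-- ===== Notes on version B (the rewrite author's own statement) =====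
-- stated objective: alternative
-- what changed: Single pass emitting (even, odd) pairs greedily from two FIFO queues instead of fully partitioning into two lists and then zipping them.
import Mathlib
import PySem

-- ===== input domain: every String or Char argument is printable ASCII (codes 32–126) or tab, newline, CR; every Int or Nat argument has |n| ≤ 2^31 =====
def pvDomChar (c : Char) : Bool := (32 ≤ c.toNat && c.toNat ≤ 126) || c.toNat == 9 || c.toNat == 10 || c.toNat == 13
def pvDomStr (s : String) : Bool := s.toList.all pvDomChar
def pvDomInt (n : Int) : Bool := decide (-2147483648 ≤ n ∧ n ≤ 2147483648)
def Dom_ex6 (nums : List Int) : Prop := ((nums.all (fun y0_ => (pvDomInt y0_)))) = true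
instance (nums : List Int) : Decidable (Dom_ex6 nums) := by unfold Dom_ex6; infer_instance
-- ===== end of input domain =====

-- B emits (even, odd) pairs greedily from two FIFO queues in a single pass instead of partitioning fully and then zipping; alternative decomposition, same cost.


-- ===== PORT A =====
-- partition into even/odd by one foldl (append, as the Python does), then zip
def ex6 (nums : List Int) : List (Int × Int) :=
  let p := nums.foldl
    (fun (p : List Int × List Int) num =>
      if PySem.Int.mod num 2 == 0 then (p.1 ++ [num], p.2) else (p.1, p.2 ++ [num]))
    ([], [])
  p.1.zip p.2

-- ===== PORT B =====
-- single pass: append to the matching queue, pop a pair whenever both queues are non-empty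
def ex6Loop : List Int → List Int → List Int → List (Int × Int) → List (Int × Int)
  | [], _, _, result => result
  | num :: rest, evens, odds, result =>
    let evens := if PySem.Int.mod num 2 == 0 then evens ++ [num] else evens
    let odds := if PySem.Int.mod num 2 == 0 then odds else odds ++ [num]
    match evens, odds with
    | a :: evens', b :: odds' => ex6Loop rest evens' odds' (result ++ [(a, b)])
    | evens, odds => ex6Loop rest evens odds result

def ex6_alt (nums : List Int) : List (Int × Int) := ex6Loop nums [] [] []

-- ===== PRECONDITION & SPEC =====
def Spec_ex6 (nums : List Int) (out : List (Int × Int)) : Prop := out = ex6_alt nums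
instance (nums : List Int) (out : List (Int × Int)) : Decidable (Spec_ex6 nums out) := by unfold Spec_ex6; infer_instance

-- ===== CLAIM (what is proved, stated in full; the proofs are below) =====
def Claim_equal_ex6 : Prop := ∀ (nums : List Int), Dom_ex6 nums → Spec_ex6 nums (ex6 nums)

-- ===== LEMMAS AND PROOFS =====

def pvEvens : List Int → List Int
  | [] => []
  | n :: ns => if PySem.Int.mod n 2 == 0 then n :: pvEvens ns else pvEvens ns

def pvOdds : List Int → List Int
  | [] => []
  | n :: ns => if PySem.Int.mod n 2 == 0 then pvOdds ns else n :: pvOdds ns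

theorem ex6_foldl_eq (ns : List Int) (e o : List Int) :
    ns.foldl (fun (p : List Int × List Int) num =>
      if PySem.Int.mod num 2 == 0 then (p.1 ++ [num], p.2) else (p.1, p.2 ++ [num])) (e, o)
    = (e ++ pvEvens ns, o ++ pvOdds ns) := by
  induction ns generalizing e o with
  | nil => simp only [List.foldl_nil, pvEvens, pvOdds, List.append_nil]
  | cons n ns ih =>
    cases hc : PySem.Int.mod n 2 == 0 with
    | true =>
      simp only [List.foldl_cons, hc, if_true, ih, pvEvens, pvOdds, List.append_assoc,
        List.singleton_append]
    | false =>
      simp only [List.foldl_cons, hc, Bool.false_eq_true, if_false, ih, pvEvens, pvOdds,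
        List.append_assoc, List.singleton_append]

theorem ex6Loop_eq (ns : List Int) (e o : List Int) (res : List (Int × Int))
    (hinv : e = [] ∨ o = []) :
    ex6Loop ns e o res = res ++ (e ++ pvEvens ns).zip (o ++ pvOdds ns) := by
  induction ns generalizing e o res with
  | nil =>
    rcases hinv with h | h <;> subst h <;>
      simp [ex6Loop, pvEvens, pvOdds]
  | cons n ns ih =>
    cases hc : PySem.Int.mod n 2 == 0 with
    | true =>
      rcases hinv with he | ho
      · subst he
        cases o with
        | nil =>
          simp only [ex6Loop, hc, if_true, List.nil_append]
          rw [ih [n] [] res (Or.inr rfl)]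
          simp only [pvEvens, pvOdds, hc, if_true, List.nil_append, List.singleton_append]
        | cons b o' =>
          simp only [ex6Loop, hc, if_true, List.nil_append]
          rw [ih [] o' (res ++ [(n, b)]) (Or.inl rfl)]
          simp only [pvEvens, pvOdds, hc, if_true, List.nil_append, List.cons_append,
            List.zip_cons_cons, List.append_assoc]
      · subst ho
        cases e with
        | nil =>
          simp only [ex6Loop, hc, if_true, List.nil_append]
          rw [ih [n] [] res (Or.inr rfl)]
          simp only [pvEvens, pvOdds, hc, if_true, List.nil_append, List.singleton_append]
        | cons a e' =>
          simp only [ex6Loop, hc, if_true]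
          show ex6Loop ns (a :: (e' ++ [n])) [] res = _
          rw [ih (a :: (e' ++ [n])) [] res (Or.inr rfl)]
          simp only [pvEvens, pvOdds, hc, if_true, List.nil_append, List.cons_append,
            List.append_assoc]
    | false =>
      rcases hinv with he | ho
      · subst he
        simp only [ex6Loop, hc, Bool.false_eq_true, if_false, List.nil_append]
        rw [ih [] (o ++ [n]) res (Or.inl rfl)]
        simp only [pvEvens, pvOdds, hc, Bool.false_eq_true, if_false, List.nil_append,
          List.append_assoc, List.singleton_append]
      · subst ho
        cases e with
        | nil =>
          simp only [ex6Loop, hc, Bool.false_eq_true, if_false, List.nil_append]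
          rw [ih [] [n] res (Or.inl rfl)]
          simp only [pvEvens, pvOdds, hc, Bool.false_eq_true, if_false, List.nil_append,
            List.singleton_append]
        | cons a e' =>
          simp only [ex6Loop, hc, Bool.false_eq_true, if_false, List.nil_append]
          rw [ih e' [] (res ++ [(a, n)]) (Or.inr rfl)]
          simp only [pvEvens, pvOdds, hc, Bool.false_eq_true, if_false, List.nil_append,
            List.cons_append, List.zip_cons_cons, List.append_assoc]

-- ===== VERDICT (by name: the statement is the Claim_ definition above) =====
theorem ex6_spec : Claim_equal_ex6 := by
  intro nums _
  unfold Spec_ex6 ex6 ex6_alt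
  rw [ex6_foldl_eq nums [] [], ex6Loop_eq nums [] [] [] (Or.inl rfl)]
  simp
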